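-- pv_equiv track=rewrite | github.com/krakasevich/WireShell | conf/vpn-app/backend/wireguard.py | get_next_available_ip
-- ===== SOURCE A (Python) =====
-- import ipaddress
--
-- def get_next_available_ip(used_ips: list) -> str:
--     """Получает следующий доступный IP-адрес из подсети 10.0.0.0/24"""
--     network = ipaddress.IPv4Network('10.0.0.0/24')
--     used_ips_set = set(used_ips)
--
--     # Начинаем с 10.0.0.2, так как 10.0.0.1 - адрес сервера
--     for ip in network.hosts():
--         ip_str = str(ip)
--         if ip_str == '10.0.0.1':
--             continue
--         if ip_str not in used_ips_set:
--             return ip_str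
--     raise Exception("Нет доступных IP-адресов")
-- ===== SOURCE B (Python) =====
-- def _host_num(ip):
--     """Host number k if ip is exactly '10.0.0.<k>' with canonical k in 2..254, else None."""
--     if not ip.startswith('10.0.0.'):
--         return None
--     tail = ip[7:]
--     if not (tail.isdigit() and str(int(tail)) == tail):
--         return None
--     n = int(tail)
--     return n if 2 <= n <= 254 else None
--
--
-- def get_next_available_ip(used_ips: list) -> str:
--     """Получает следующий доступный IP-адрес из подсети 10.0.0.0/24"""
--     used_nums = {n for n in map(_host_num, used_ips) if n is not None}
--     expected = 2
--     for n in sorted(used_nums):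
--         if n == expected:
--             expected += 1
--         else:
--             break
--     if expected > 254:
--         raise Exception("Нет доступных IP-адресов")
--     return f"10.0.0.{expected}"
-- ===== Notes on version B (the rewrite author's own statement) =====
-- stated objective: alternative
-- what changed: B no longer probes candidate addresses against a membership set: it parses each used IP into its host number (only exact canonical '10.0.0.<k>', k in 2..254, counts), sorts the distinct numbers, and gap-scans the sorted list for the first missing number.
import Mathlib
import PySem

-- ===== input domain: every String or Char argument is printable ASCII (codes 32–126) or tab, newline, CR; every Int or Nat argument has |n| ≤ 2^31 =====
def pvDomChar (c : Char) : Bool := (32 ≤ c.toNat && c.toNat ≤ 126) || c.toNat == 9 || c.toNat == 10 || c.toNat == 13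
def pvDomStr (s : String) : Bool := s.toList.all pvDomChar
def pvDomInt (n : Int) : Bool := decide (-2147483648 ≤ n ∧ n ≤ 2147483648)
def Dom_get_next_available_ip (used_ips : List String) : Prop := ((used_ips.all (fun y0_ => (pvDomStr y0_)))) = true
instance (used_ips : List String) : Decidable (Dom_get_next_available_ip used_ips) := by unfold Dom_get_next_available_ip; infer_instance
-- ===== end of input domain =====

-- B replaces A's membership scan over all candidate addresses by parsing the used IPs into host
-- numbers, sorting them, and gap-scanning the sorted list for the first missing number (alternative
-- decomposition: sort-then-gap-scan over the n used entries instead of a probe per candidate).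

-- ===== PORT A =====
-- scan over the host numbers 1..254 (network.hosts()); str(ip) = "10.0.0." ++ str(i)
def pvIpGoA (used : PySem.Set String) : List Int → Option String
  | [] => none
  | i :: rest =>
      let ip_str := "10.0.0." ++ PySem.Int.toStr i
      if ip_str = "10.0.0.1" then pvIpGoA used rest
      else if PySem.Set.contains used ip_str then pvIpGoA used rest
      else some ip_str

def get_next_available_ip (used_ips : List String) : String :=
  match pvIpGoA (PySem.Set.ofList used_ips) (PySem.List.pyRange 1 255 1) with
  | some s => s
  | none => ""   -- Python raises Exception here; excluded by Pre_

-- ===== PORT B =====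
-- _host_num(ip): host number k if ip is exactly "10.0.0.<k>" with canonical k in 2..254, else None
def pvHostNum? (ip : String) : Option Int :=
  if PySem.Str.startswith ip "10.0.0." = false then none
  else
    if (PySem.Str.strIsdigit (PySem.Str.slice ip (some 7) none) &&
        ((PySem.Int.ofStr? (PySem.Str.slice ip (some 7) none)).map PySem.Int.toStr
          == some (PySem.Str.slice ip (some 7) none))) = false then none
    else
      match PySem.Int.ofStr? (PySem.Str.slice ip (some 7) none) with
      | some n => if 2 ≤ n ∧ n ≤ 254 then some n else none
      | none => none   -- unreachable: tail.isdigit() guarantees int(tail) succeeds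

-- the for-loop with break: expected advances while the sorted list stays consecutive
def pvGap : Int → List Int → Int
  | e, [] => e
  | e, n :: t => if n = e then pvGap (e + 1) t else e

def get_next_available_ip_alt (used_ips : List String) : String :=
  let used_nums : PySem.Set Int :=
    (used_ips.map pvHostNum?).foldl
      (fun s n? => match n? with | some n => PySem.Set.add s n | none => s) PySem.Set.empty
  let expected := pvGap 2 (PySem.List.sorted used_nums (fun i => i) false)
  if 254 < expected then ""   -- Source B raises Exception here; excluded by Pre_
  else "10.0.0." ++ PySem.Int.toStr expected

-- ===== PRECONDITION & SPEC =====
-- Pre_ excludes exactly the inputs where all 253 eligible addresses 10.0.0.2 .. 10.0.0.254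
-- are used: there both A and B raise Exception("Нет доступных IP-адресов").
def Pre_get_next_available_ip (used_ips : List String) : Prop :=
  ∃ i ∈ PySem.List.pyRange 2 255 1, ("10.0.0." ++ PySem.Int.toStr i) ∉ used_ips
instance (used_ips : List String) : Decidable (Pre_get_next_available_ip used_ips) := by
  unfold Pre_get_next_available_ip; infer_instance
def pvWitness_get_next_available_ip : List String := ["10.0.0.2", "10.0.0.5"]

def Spec_get_next_available_ip (used_ips : List String) (out : String) : Prop := out = get_next_available_ip_alt used_ips
instance (used_ips : List String) (out : String) : Decidable (Spec_get_next_available_ip used_ips out) := by unfold Spec_get_next_available_ip; infer_instance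

-- ===== CLAIM (what is proved, stated in full; the proofs are below) =====
def Claim_equal_get_next_available_ip : Prop := ∀ (used_ips : List String), Dom_get_next_available_ip used_ips → Pre_get_next_available_ip used_ips → Spec_get_next_available_ip used_ips (get_next_available_ip used_ips)

-- ===== LEMMAS AND PROOFS =====

-- no host number 2..254 renders as the server address "10.0.0.1"
set_option maxRecDepth 8000 in
lemma pvIp_no_server : ∀ i ∈ PySem.List.pyRange 2 255 1,
    ("10.0.0." ++ PySem.Int.toStr i) ≠ "10.0.0.1" := by decide

-- A's scan is the head of the filtered list
lemma pvIpGoA_eq_filter_head (used : PySem.Set String) (l : List Int)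
    (h1 : ∀ i ∈ l, ("10.0.0." ++ PySem.Int.toStr i) ≠ "10.0.0.1") :
    pvIpGoA used l =
      (l.filter (fun i => !(PySem.Set.contains used ("10.0.0." ++ PySem.Int.toStr i)))).head?.map
        (fun i => "10.0.0." ++ PySem.Int.toStr i) := by
  induction l with
  | nil => rfl
  | cons i rest ih =>
      have hne := h1 i (List.mem_cons_self)
      have hrest := ih (fun j hj => h1 j (List.mem_cons_of_mem _ hj))
      simp only [pvIpGoA, List.filter_cons]
      rw [if_neg hne]
      by_cases hc : PySem.Set.contains used ("10.0.0." ++ PySem.Int.toStr i) = true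
      · have hb : (!PySem.Set.contains used ("10.0.0." ++ PySem.Int.toStr i)) = false := by
          rw [hc]; rfl
        rw [if_pos hc, hrest, hb]
        simp
      · have hb : (!PySem.Set.contains used ("10.0.0." ++ PySem.Int.toStr i)) = true := by
          rw [Bool.not_eq_true] at hc; rw [hc]; rfl
        rw [if_neg hc, hb]
        simp

-- the canonical addresses parse back to their host number
set_option maxRecDepth 16000 in
lemma pvHostNum?_canon : ∀ k ∈ PySem.List.pyRange 2 255 1,
    pvHostNum? ("10.0.0." ++ PySem.Int.toStr k) = some k := by decide

-- a successful parse means the string IS the canonical address of its host number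
lemma pvHostNum?_some {ip : String} {k : Int} (h : pvHostNum? ip = some k) :
    ip = "10.0.0." ++ PySem.Int.toStr k ∧ 2 ≤ k ∧ k ≤ 254 := by
  unfold pvHostNum? at h
  split at h
  · exact absurd h (by simp)
  · rename_i hsw
    rw [Bool.not_eq_false] at hsw
    split at h
    · exact absurd h (by simp)
    · rename_i hcond
      rw [Bool.not_eq_false, Bool.and_eq_true, beq_iff_eq] at hcond
      obtain ⟨hdig, hcanon⟩ := hcond
      -- ip = "10.0.0." ++ tail
      have hpre : "10.0.0.".toList <+: ip.toList := by
        rw [PySem.Str.startswith_eq, PySem.Chars.startswith_iff] at hsw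
        exact hsw
      obtain ⟨rest, hrest⟩ := hpre
      have htail : (PySem.Str.slice ip (some 7) none).toList = rest := by
        rw [PySem.Str.toList_slice, PySem.Chars.slice_eq_listSlice]
        have h7 : (7 : Int) = ((7 : Nat) : Int) := by norm_num
        rw [h7, PySem.List.slice_from_natCast, ← hrest]
        simp
      cases hn : PySem.Int.ofStr? (PySem.Str.slice ip (some 7) none) with
      | none => rw [hn] at h; simp at h
      | some n =>
          rw [hn] at h hcanon
          rw [Option.map_some] at hcanon
          have htl : PySem.Int.toStr n = PySem.Str.slice ip (some 7) none := by
            injection hcanon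
          simp only [] at h
          split at h
          · rename_i hbound
            have hk : n = k := by injection h
            subst hk
            refine ⟨?_, hbound.1, hbound.2⟩
            apply String.toList_inj.mp
            rw [String.toList_append, ← hrest, ← htail, htl]
          · simp at h

-- membership in the fold that builds used_nums
lemma pvMem_fold (l : List (Option Int)) (s : PySem.Set Int) (k : Int) :
    k ∈ l.foldl (fun s n? => match n? with | some n => PySem.Set.add s n | none => s) s ↔
      k ∈ s ∨ some k ∈ l := by
  induction l generalizing s with
  | nil => simp
  | cons n? t ih =>
      cases n? with
      | some n =>
          simp only [List.foldl_cons, ih, PySem.Set.mem_add, List.mem_cons]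
          constructor
          · rintro (⟨hs | he⟩ | ht)
            · exact Or.inl hs
            · exact Or.inr (Or.inl (by rw [he]))
            · exact Or.inr (Or.inr ht)
          · rintro (hs | he | ht)
            · exact Or.inl (Or.inl hs)
            · exact Or.inl (Or.inr (by injection he))
            · exact Or.inr ht
      | none =>
          simp only [List.foldl_cons, ih, List.mem_cons]
          constructor
          · rintro (hs | ht)
            · exact Or.inl hs
            · exact Or.inr (Or.inr ht)
          · rintro (hs | he | ht)
            · exact Or.inl hs
            · exact absurd he (by simp)
            · exact Or.inr ht

lemma pvNodup_fold (l : List (Option Int)) (s : PySem.Set Int) (hs : s.Nodup) :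
    (l.foldl (fun s n? => match n? with | some n => PySem.Set.add s n | none => s) s).Nodup := by
  induction l generalizing s with
  | nil => exact hs
  | cons n? t ih =>
      simp only [List.foldl_cons]
      cases n? with
      | some n => exact ih _ (PySem.Set.nodup_add s n hs)
      | none => exact ih _ hs

-- the gap scan returns the least number ≥ e missing from a strictly increasing list
lemma pvGap_spec (l : List Int) (e : Int) (hpw : l.Pairwise (· < ·)) (hge : ∀ n ∈ l, e ≤ n) :
    e ≤ pvGap e l ∧ pvGap e l ∉ l ∧ ∀ j, e ≤ j → j < pvGap e l → j ∈ l := by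
  induction l generalizing e with
  | nil =>
      refine ⟨le_refl e, by simp, fun j hj hlt => absurd (lt_of_le_of_lt hj hlt) (by simp [pvGap])⟩
  | cons n t ih =>
      obtain ⟨hnt, hpt⟩ := List.pairwise_cons.mp hpw
      by_cases hne : n = e
      · subst hne
        have hstep : pvGap n (n :: t) = pvGap (n + 1) t := by simp [pvGap]
        have hget : ∀ m ∈ t, n + 1 ≤ m := fun m hm => Int.add_one_le_iff.mpr (hnt m hm)
        obtain ⟨hle, hnotin, hall⟩ := ih (n + 1) hpt hget
        rw [hstep]
        refine ⟨le_trans (by omega) hle, ?_, ?_⟩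
        · intro hmem
          rcases List.mem_cons.mp hmem with h | h
          · omega
          · exact hnotin h
        · intro j hj hlt
          by_cases hjn : j = n
          · exact hjn ▸ List.mem_cons_self
          · exact List.mem_cons_of_mem _ (hall j (by omega) hlt)
      · have hstep : pvGap e (n :: t) = e := by simp [pvGap, hne]
        rw [hstep]
        have hgt : e < n := lt_of_le_of_ne (hge n List.mem_cons_self) (fun h => hne h.symm)
        refine ⟨le_refl e, ?_, fun j hj hlt => absurd (lt_of_le_of_lt hj hlt) (by simp)⟩
        intro hmem
        rcases List.mem_cons.mp hmem with h | h
        · omega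
        · exact absurd (hnt e h) (by omega)

-- head of a pairwise-< list is its strict lower bound witness
lemma pvHead_min {l : List Int} {m : Int} (hpw : l.Pairwise (· < ·)) (hh : l.head? = some m) :
    m ∈ l ∧ ∀ j ∈ l, m ≤ j := by
  cases l with
  | nil => simp at hh
  | cons x t =>
      have hx : x = m := by injection hh
      subst hx
      refine ⟨List.mem_cons_self, fun j hj => ?_⟩
      rcases List.mem_cons.mp hj with h | h
      · omega
      · exact le_of_lt ((List.pairwise_cons.mp hpw).1 j h)

-- ===== VERDICT (by name: the statement is the Claim_ definition above) =====
theorem get_next_available_ip_spec : Claim_equal_get_next_available_ip := by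
  intro used_ips _ hpre
  unfold Spec_get_next_available_ip get_next_available_ip
  -- A side: head of the filtered candidate range
  set p : Int → Bool :=
    fun i => !(PySem.Set.contains (PySem.Set.ofList used_ips) ("10.0.0." ++ PySem.Int.toStr i)) with hp
  have hpiff : ∀ i, p i = true ↔ ("10.0.0." ++ PySem.Int.toStr i) ∉ used_ips := by
    intro i
    rw [hp]
    simp [PySem.Set.mem_ofList]
  have hsplit : PySem.List.pyRange 1 255 1 = 1 :: PySem.List.pyRange 2 255 1 := by
    have := PySem.List.pyRange_one_cons (a := 1) (b := 255) (by norm_num)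
    simpa using this
  rw [hsplit]
  have h1s : ("10.0.0." ++ PySem.Int.toStr 1) = "10.0.0.1" := by decide
  have hskip : pvIpGoA (PySem.Set.ofList used_ips) (1 :: PySem.List.pyRange 2 255 1)
      = pvIpGoA (PySem.Set.ofList used_ips) (PySem.List.pyRange 2 255 1) := by
    simp only [pvIpGoA]
    rw [if_pos h1s]
  rw [hskip, pvIpGoA_eq_filter_head _ _ pvIp_no_server]
  have hpwL : ((PySem.List.pyRange 2 255 1).filter p).Pairwise (· < ·) :=
    (PySem.List.pairwise_lt_pyRange_one (a := 2) (b := 255)).filter p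
  obtain ⟨i0, hi0, hni0⟩ := hpre
  have hmemf : i0 ∈ (PySem.List.pyRange 2 255 1).filter p :=
    List.mem_filter.mpr ⟨hi0, (hpiff i0).mpr hni0⟩
  obtain ⟨m, hm⟩ : ∃ m, ((PySem.List.pyRange 2 255 1).filter p).head? = some m := by
    cases hfl : (PySem.List.pyRange 2 255 1).filter p with
    | nil => rw [hfl] at hmemf; simp at hmemf
    | cons x t => exact ⟨x, rfl⟩
  obtain ⟨hmmem, hmmin⟩ := pvHead_min hpwL hm
  have hmrange : m ∈ PySem.List.pyRange 2 255 1 := (List.mem_filter.mp hmmem).1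
  have hmp : ("10.0.0." ++ PySem.Int.toStr m) ∉ used_ips :=
    (hpiff m).mp (List.mem_filter.mp hmmem).2
  have hmbound : 2 ≤ m ∧ m ≤ 254 := by
    have := PySem.List.mem_pyRange_one.mp hmrange
    omega
  -- B side: gap scan over the sorted parsed host numbers
  set used_nums : PySem.Set Int :=
    (used_ips.map pvHostNum?).foldl
      (fun s n? => match n? with | some n => PySem.Set.add s n | none => s) PySem.Set.empty
    with hun
  have hmemN : ∀ k, k ∈ used_nums ↔ ∃ ip ∈ used_ips, pvHostNum? ip = some k := by
    intro k
    rw [hun, pvMem_fold]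
    simp [PySem.Set.empty, List.mem_map]
  have hiffN : ∀ k, k ∈ PySem.List.pyRange 2 255 1 →
      (k ∈ used_nums ↔ ("10.0.0." ++ PySem.Int.toStr k) ∈ used_ips) := by
    intro k hk
    rw [hmemN]
    constructor
    · rintro ⟨ip, hip, hparse⟩
      obtain ⟨heq, _, _⟩ := pvHostNum?_some hparse
      exact heq ▸ hip
    · intro hmem
      exact ⟨_, hmem, pvHostNum?_canon k hk⟩
  have hnodupN : used_nums.Nodup := pvNodup_fold _ _ (by simp [PySem.Set.empty])
  set l := PySem.List.sorted used_nums (fun i : Int => i) false with hl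
  have hmemL : ∀ k, k ∈ l ↔ k ∈ used_nums := fun k => PySem.List.mem_sorted _ _ _ _
  have hpwl : l.Pairwise (· < ·) := by
    have hle : l.Pairwise (· ≤ ·) := PySem.List.sorted_pairwise used_nums (fun i : Int => i)
    have hnd : l.Nodup :=
      (PySem.List.sorted_perm used_nums (fun i : Int => i) false).nodup_iff.mpr hnodupN
    exact (hle.and hnd).imp (fun h => lt_of_le_of_ne h.1 h.2)
  have hgel : ∀ n ∈ l, (2 : Int) ≤ n := by
    intro n hn
    obtain ⟨ip, _, hparse⟩ := (hmemN n).mp ((hmemL n).mp hn)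
    exact (pvHostNum?_some hparse).2.1
  obtain ⟨hle2, hnotin, hall⟩ := pvGap_spec l 2 hpwl hgel
  set e := pvGap 2 l with he
  -- e = m
  have hem : e = m := by
    have h1 : e ≤ m := by
      by_contra hlt
      rw [not_le] at hlt
      have : m ∈ l := hall m hmbound.1 hlt
      obtain ⟨ip, hip, hparse⟩ := (hmemN m).mp ((hmemL m).mp this)
      obtain ⟨heq, _, _⟩ := pvHostNum?_some hparse
      exact hmp (heq ▸ hip)
    have h2 : m ≤ e := by
      have herange : e ∈ PySem.List.pyRange 2 255 1 :=
        PySem.List.mem_pyRange_one.mpr ⟨hle2, by omega⟩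
      have hestr : ("10.0.0." ++ PySem.Int.toStr e) ∉ used_ips := by
        intro hmem
        exact hnotin ((hmemL e).mpr ((hiffN e herange).mpr hmem))
      exact hmmin e (List.mem_filter.mpr ⟨herange, (hpiff e).mpr hestr⟩)
    omega
  have halt : get_next_available_ip_alt used_ips =
      if 254 < pvGap 2 (PySem.List.sorted used_nums (fun i : Int => i) false) then ""
      else "10.0.0." ++ PySem.Int.toStr (pvGap 2 (PySem.List.sorted used_nums (fun i : Int => i) false)) := rfl
  rw [hm, halt]
  show ("10.0.0." ++ PySem.Int.toStr m) = _
  rw [show pvGap 2 (PySem.List.sorted used_nums (fun i : Int => i) false) = m from hem]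
  rw [if_neg (by omega)]
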